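-- pv_equiv track=rewrite | github.com/NiharikaKondepudi/AI_RESUME_ANALYZER_BASED_ON_ATS | analyzer.py | parse_sections_by_iteration
-- ===== SOURCE A (Python) =====
-- def parse_sections_by_iteration(text):
--     """
--     Parses the resume text line-by-line to accurately identify sections.
--     """
--     section_keywords = {
--         "profile_summary": ["summary", "profile", "objective"],
--         "work_experience": ["experience", "work history", "professional experience", "experience details"],
--         "education": ["education", "academic background", "academic record", "professional qualification"],
--         "skills": ["skills", "technical skills", "technical proficiency", "tools", "skill set", "core competencies", "areas of expertise", "computer skills"]
--     }
--
--     keyword_to_section = {kw: key for key, kws in section_keywords.items() for kw in kws}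
--
--     sections = {key: [] for key in section_keywords.keys()}
--     current_section = None
--
--     lines = text.split('\n')
--     for line in lines:
--         cleaned_line = line.strip().lower().replace(':', '')
--
--         if 1 <= len(cleaned_line.split()) <= 4 and cleaned_line in keyword_to_section:
--             current_section = keyword_to_section[cleaned_line]
--             continue
--
--         if current_section:
--             sections[current_section].append(line)
--
--     for section_name, section_lines in sections.items():
--         sections[section_name] = "\n".join(section_lines).strip()
--
--     return sections
-- ===== SOURCE B (Python) =====
-- def parse_sections_by_iteration(text):
--     """Span-based parser: find each header line, then grab the whole block of
--     lines up to the next header in one slice."""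
--     keyword_to_section = {
--         "summary": "profile_summary", "profile": "profile_summary",
--         "objective": "profile_summary",
--         "experience": "work_experience", "work history": "work_experience",
--         "professional experience": "work_experience",
--         "experience details": "work_experience",
--         "education": "education", "academic background": "education",
--         "academic record": "education",
--         "professional qualification": "education",
--         "skills": "skills", "technical skills": "skills",
--         "technical proficiency": "skills", "tools": "skills",
--         "skill set": "skills", "core competencies": "skills",
--         "areas of expertise": "skills", "computer skills": "skills",
--     }
--
--     def header_of(line):
--         cleaned = line.strip().lower().replace(':', '')
--         if 1 <= len(cleaned.split()) <= 4:
--             return keyword_to_section.get(cleaned)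
--         return None
--
--     lines = text.split('\n')
--     n = len(lines)
--     sections = {"profile_summary": [], "work_experience": [],
--                 "education": [], "skills": []}
--     i = 0
--     while i < n:
--         sec = header_of(lines[i])
--         i += 1
--         if sec is None:
--             continue
--         start = i
--         while i < n and header_of(lines[i]) is None:
--             i += 1
--         sections[sec].extend(lines[start:i])
--     return {name: "\n".join(body).strip() for name, body in sections.items()}
-- ===== Notes on version B (the rewrite author's own statement) =====
-- stated objective: alternative
-- what changed: A is a per-line state machine appending each line to the section of a current_section variable; B records no per-line state: it locates each header line and extends that header's section with the whole slice of lines up to the next header in one step.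
import Mathlib
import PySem

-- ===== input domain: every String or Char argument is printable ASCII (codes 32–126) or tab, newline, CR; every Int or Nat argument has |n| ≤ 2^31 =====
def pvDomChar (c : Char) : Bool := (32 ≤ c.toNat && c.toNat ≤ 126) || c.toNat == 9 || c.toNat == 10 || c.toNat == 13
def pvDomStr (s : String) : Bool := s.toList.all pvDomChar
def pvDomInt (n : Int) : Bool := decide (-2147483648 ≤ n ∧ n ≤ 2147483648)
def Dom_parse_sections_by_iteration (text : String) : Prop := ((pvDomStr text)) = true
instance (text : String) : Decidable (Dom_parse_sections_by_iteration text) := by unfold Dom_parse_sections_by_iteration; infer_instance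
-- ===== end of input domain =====

-- B replaces A's per-line state machine (a current_section variable updated line by line) with a
-- span-based scan: find a header line, then take the whole block up to the next header in one slice
-- (objective: alternative decomposition, same cost).

-- ===== PORT A =====
-- section_keywords literal dict
def pvSectionKeywords : PySem.Dict String (List String) :=
  PySem.Dict.ofList
    [ ("profile_summary", ["summary", "profile", "objective"]),
      ("work_experience", ["experience", "work history", "professional experience", "experience details"]),
      ("education", ["education", "academic background", "academic record", "professional qualification"]),
      ("skills", ["skills", "technical skills", "technical proficiency", "tools", "skill set", "core competencies", "areas of expertise", "computer skills"]) ]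

-- {kw: key for key, kws in section_keywords.items() for kw in kws}
def pvKeywordToSection : PySem.Dict String String :=
  pvSectionKeywords.items.foldl
    (fun d p => p.2.foldl (fun d kw => d.insert kw p.1) d) PySem.Dict.empty

-- cleaned_line = line.strip().lower().replace(':', '')
def pvCleanA (line : String) : String :=
  PySem.Str.replace (PySem.Str.lower (PySem.Str.strip line)) ":" ""

-- the for-loop over lines, carrying (sections, current_section); the None/set test on
-- current_section is Option.elim
def pvLoopA : List String → PySem.Dict String (List String) → Option String → PySem.Dict String (List String)
  | [], sections, _ => sections
  | line :: rest, sections, cur =>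
    if 1 ≤ (PySem.Str.split₀ (pvCleanA line)).length ∧ (PySem.Str.split₀ (pvCleanA line)).length ≤ 4
        ∧ (pvKeywordToSection.get? (pvCleanA line)).isSome then
      pvLoopA rest sections (pvKeywordToSection.get? (pvCleanA line))
    else
      cur.elim (pvLoopA rest sections cur)
        (fun s => pvLoopA rest (sections.modify s [] (fun v => v ++ [line])) cur)

def parse_sections_by_iteration (text : String) : List (String × String) :=
  -- lines = text.split('\n'): the separator "\n" is nonempty so split? is some ('.getD []' only discharges the option);
  -- the final in-place rewrite 'sections[name] = "\n".join(lines).strip()' is read off the items list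
  (pvLoopA ((PySem.Str.split? text "\n").getD [])
      (pvSectionKeywords.keys.foldl (fun d key => d.insert key ([] : List String)) PySem.Dict.empty)
      none).items.map
    (fun p => (p.1, PySem.Str.strip (PySem.Str.join "\n" p.2)))

-- ===== PORT B =====
-- keyword_to_section, written out literally in Source B
def pvKwB : PySem.Dict String String :=
  PySem.Dict.ofList
    [ ("summary", "profile_summary"), ("profile", "profile_summary"), ("objective", "profile_summary"),
      ("experience", "work_experience"), ("work history", "work_experience"),
      ("professional experience", "work_experience"), ("experience details", "work_experience"),
      ("education", "education"), ("academic background", "education"),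
      ("academic record", "education"), ("professional qualification", "education"),
      ("skills", "skills"), ("technical skills", "skills"), ("technical proficiency", "skills"),
      ("tools", "skills"), ("skill set", "skills"), ("core competencies", "skills"),
      ("areas of expertise", "skills"), ("computer skills", "skills") ]

-- cleaned = line.strip().lower().replace(':', '') inside header_of
def pvCleanB (line : String) : String :=
  PySem.Str.replace (PySem.Str.lower (PySem.Str.strip line)) ":" ""

-- header_of(line)
def pvHeaderOf (line : String) : Option String :=
  if 1 ≤ (PySem.Str.split₀ (pvCleanB line)).length ∧ (PySem.Str.split₀ (pvCleanB line)).length ≤ 4 then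
    pvKwB.get? (pvCleanB line)
  else none

-- Source B's outer 'while i < n' with the inner 'while i < n and header_of(lines[i]) is None' plus the
-- slice 'lines[start:i]' becomes the takeWhile/dropWhile split of the remaining lines; the 'sec is
-- None' test is Option.elim; the fuel argument (called with n = len(lines)) only makes the
-- recursion structural and is never exhausted
def pvGoB : Nat → List String → PySem.Dict String (List String) → PySem.Dict String (List String)
  | 0, _, sections => sections
  | _ + 1, [], sections => sections
  | fuel + 1, line :: rest, sections =>
    (pvHeaderOf line).elim (pvGoB fuel rest sections)
      (fun sec =>
        pvGoB fuel (rest.dropWhile (fun x => (pvHeaderOf x).isNone))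
          (sections.modify sec [] (fun v => v ++ rest.takeWhile (fun x => (pvHeaderOf x).isNone))))

def parse_sections_by_iteration_alt (text : String) : List (String × String) :=
  (pvGoB ((PySem.Str.split? text "\n").getD []).length
      ((PySem.Str.split? text "\n").getD [])
      (PySem.Dict.ofList [("profile_summary", []), ("work_experience", []), ("education", []), ("skills", [])])).items.map
    (fun p => (p.1, PySem.Str.strip (PySem.Str.join "\n" p.2)))

-- ===== PRECONDITION & SPEC =====
def Spec_parse_sections_by_iteration (text : String) (out : List (String × String)) : Prop := out = parse_sections_by_iteration_alt text
instance (text : String) (out : List (String × String)) : Decidable (Spec_parse_sections_by_iteration text out) := by unfold Spec_parse_sections_by_iteration; infer_instance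

-- ===== CLAIM (what is proved, stated in full; the proofs are below) =====
def Claim_equal_parse_sections_by_iteration : Prop := ∀ (text : String), Dom_parse_sections_by_iteration text → Spec_parse_sections_by_iteration text (parse_sections_by_iteration text)

-- ===== LEMMAS AND PROOFS =====

-- the four section keys, in insertion order
def pvK4 : List String := ["profile_summary", "work_experience", "education", "skills"]

-- the lines A's state machine assigns to section k, starting from state cur
def pvCollect : Option String → List String → String → List String
  | _, [], _ => []
  | cur, x :: r, k =>
    (pvHeaderOf x).elim
      (cur.elim (pvCollect none r k)
        (fun s => (if s = k then [x] else []) ++ pvCollect (some s) r k))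
      (fun s => pvCollect (some s) r k)

-- hand-stated unfolding equations (rfl); rewriting with these keeps every match scrutinee a variable
lemma pvLoopA_nil (d : PySem.Dict String (List String)) (cur : Option String) :
    pvLoopA [] d cur = d := rfl

lemma pvLoopA_cons (x : String) (r : List String) (d : PySem.Dict String (List String)) (cur : Option String) :
    pvLoopA (x :: r) d cur =
      if 1 ≤ (PySem.Str.split₀ (pvCleanA x)).length ∧ (PySem.Str.split₀ (pvCleanA x)).length ≤ 4
          ∧ (pvKeywordToSection.get? (pvCleanA x)).isSome then
        pvLoopA r d (pvKeywordToSection.get? (pvCleanA x))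
      else
        cur.elim (pvLoopA r d cur)
          (fun s => pvLoopA r (d.modify s [] (fun v => v ++ [x])) cur) := rfl

lemma pvGoB_zero (ls : List String) (d : PySem.Dict String (List String)) : pvGoB 0 ls d = d := rfl

lemma pvGoB_succ_nil (fuel : Nat) (d : PySem.Dict String (List String)) : pvGoB (fuel + 1) [] d = d := rfl

lemma pvGoB_succ_cons (fuel : Nat) (x : String) (r : List String) (d : PySem.Dict String (List String)) :
    pvGoB (fuel + 1) (x :: r) d =
      (pvHeaderOf x).elim (pvGoB fuel r d)
        (fun sec =>
          pvGoB fuel (r.dropWhile (fun y => (pvHeaderOf y).isNone))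
            (d.modify sec [] (fun v => v ++ r.takeWhile (fun y => (pvHeaderOf y).isNone)))) := rfl

lemma pvCollect_nil (cur : Option String) (k : String) : pvCollect cur [] k = [] := rfl

lemma pvCollect_cons (cur : Option String) (x : String) (r : List String) (k : String) :
    pvCollect cur (x :: r) k =
      (pvHeaderOf x).elim
        (cur.elim (pvCollect none r k)
          (fun s => (if s = k then [x] else []) ++ pvCollect (some s) r k))
        (fun s => pvCollect (some s) r k) := rfl

lemma pv_clean_eq : pvCleanB = pvCleanA := rfl

set_option maxHeartbeats 1000000 in
lemma pv_kw_eq : pvKeywordToSection = pvKwB := by decide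

set_option maxHeartbeats 1000000 in
lemma pv_kwB_values : ∀ c s, pvKwB.get? c = some s → s ∈ pvK4 := by
  intro c s h
  have h2 := PySem.Dict.mem_items_of_get?_eq_some pvKwB h
  have h3 : pvKwB.items =
      [ ("summary", "profile_summary"), ("profile", "profile_summary"), ("objective", "profile_summary"),
        ("experience", "work_experience"), ("work history", "work_experience"),
        ("professional experience", "work_experience"), ("experience details", "work_experience"),
        ("education", "education"), ("academic background", "education"),
        ("academic record", "education"), ("professional qualification", "education"),
        ("skills", "skills"), ("technical skills", "skills"), ("technical proficiency", "skills"),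
        ("tools", "skills"), ("skill set", "skills"), ("core competencies", "skills"),
        ("areas of expertise", "skills"), ("computer skills", "skills") ] := by decide
  rw [h3] at h2
  simp only [List.mem_cons, List.not_mem_nil, or_false, Prod.mk.injEq] at h2
  rcases h2 with h|h|h|h|h|h|h|h|h|h|h|h|h|h|h|h|h|h|h <;>
    (rw [h.2]; simp [pvK4])

-- A's header test, phrased through B's header_of
lemma pv_headerOf_eq (line : String) :
    pvHeaderOf line =
      if 1 ≤ (PySem.Str.split₀ (pvCleanA line)).length ∧ (PySem.Str.split₀ (pvCleanA line)).length ≤ 4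
          ∧ (pvKeywordToSection.get? (pvCleanA line)).isSome then
        pvKeywordToSection.get? (pvCleanA line)
      else none := by
  rw [pv_kw_eq]
  unfold pvHeaderOf
  rw [pv_clean_eq]
  by_cases h1 : 1 ≤ (PySem.Str.split₀ (pvCleanA line)).length ∧ (PySem.Str.split₀ (pvCleanA line)).length ≤ 4
  · rcases h : pvKwB.get? (pvCleanA line) with _ | s
    · simp [h1]
    · simp [h1]
  · rw [if_neg h1, if_neg (fun hc => h1 ⟨hc.1, hc.2.1⟩)]

lemma pv_headerOf_mem : ∀ x s, pvHeaderOf x = some s → s ∈ pvK4 := by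
  intro x s h
  unfold pvHeaderOf at h
  split at h
  · exact pv_kwB_values _ _ h
  · exact absurd h (by simp)

-- keys are preserved: every modify hits one of the four present keys
lemma pv_keys_modify_mem (d : PySem.Dict String (List String)) (s : String) (f : List String → List String)
    (hk : d.keys = pvK4) (hs : s ∈ pvK4) : (d.modify s [] f).keys = pvK4 := by
  rw [PySem.Dict.keys_modify, PySem.Dict.keys_insert_of_contains]
  · exact hk
  · have hmem : s ∈ d.keys := by rw [hk]; exact hs
    exact (PySem.Dict.contains_iff_mem_keys d s).mpr hmem

lemma pv_keysA : ∀ (ls : List String) (d : PySem.Dict String (List String)) (cur : Option String),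
    d.keys = pvK4 → (∀ s, cur = some s → s ∈ pvK4) → (pvLoopA ls d cur).keys = pvK4 := by
  intro ls
  induction ls with
  | nil => intro d cur hk _; rw [pvLoopA_nil]; exact hk
  | cons x r ih =>
    intro d cur hk hcur
    rw [pvLoopA_cons]
    split
    · rename_i hc
      refine ih d _ hk ?_
      intro s hs
      have hh : pvHeaderOf x = some s := by rw [pv_headerOf_eq, if_pos hc]; exact hs
      exact pv_headerOf_mem x s hh
    · rcases cur with _ | s
      · simpa only [Option.elim_none] using ih d none hk hcur
      · simp only [Option.elim_some]
        exact ih _ _ (pv_keys_modify_mem d s _ hk (hcur s rfl)) hcur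

lemma pv_keysB : ∀ (fuel : Nat) (ls : List String) (d : PySem.Dict String (List String)),
    d.keys = pvK4 → (pvGoB fuel ls d).keys = pvK4 := by
  intro fuel
  induction fuel with
  | zero => intro ls d hk; rw [pvGoB_zero]; exact hk
  | succ fuel ih =>
    intro ls d hk
    match ls with
    | [] => rw [pvGoB_succ_nil]; exact hk
    | x :: r =>
      rw [pvGoB_succ_cons]
      rcases hx : pvHeaderOf x with _ | sec
      · simpa only [Option.elim_none] using ih r d hk
      · simp only [Option.elim_some]
        exact ih _ _ (pv_keys_modify_mem d sec _ hk (pv_headerOf_mem x sec hx))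

lemma pv_getDA : ∀ (ls : List String) (d : PySem.Dict String (List String)) (cur : Option String) (k : String),
    (pvLoopA ls d cur).getD k [] = d.getD k [] ++ pvCollect cur ls k := by
  intro ls
  induction ls with
  | nil => intro d cur k; rw [pvLoopA_nil, pvCollect_nil, List.append_nil]
  | cons x r ih =>
    intro d cur k
    rw [pvLoopA_cons, pvCollect_cons]
    split
    · rename_i hc
      rcases hs : pvKeywordToSection.get? (pvCleanA x) with _ | s
      · rw [hs] at hc; exact absurd hc.2.2 (by simp)
      · have hh : pvHeaderOf x = some s := by rw [pv_headerOf_eq, if_pos hc]; exact hs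
        rw [hh]
        simp only [Option.elim_some]
        exact ih d (some s) k
    · rename_i hc
      have hh : pvHeaderOf x = none := by rw [pv_headerOf_eq, if_neg hc]
      rw [hh]
      simp only [Option.elim_none]
      rcases cur with _ | s
      · simp only [Option.elim_none]
        exact ih d none k
      · simp only [Option.elim_some]
        rw [ih, PySem.Dict.getD_modify]
        by_cases hks : k = s
        · subst hks; simp
        · simp [hks, Ne.symm hks]

lemma pv_collect_some : ∀ (ls : List String) (s k : String),
    pvCollect (some s) ls k =
      (if s = k then ls.takeWhile (fun x => (pvHeaderOf x).isNone) else []) ++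
        pvCollect none (ls.dropWhile (fun x => (pvHeaderOf x).isNone)) k := by
  intro ls
  induction ls with
  | nil => intro s k; simp [pvCollect_nil]
  | cons x r ih =>
    intro s k
    have hcons := pvCollect_cons (some s) x r k
    rcases hx : pvHeaderOf x with _ | s'
    · have hpx : (pvHeaderOf x).isNone = true := by rw [hx]; rfl
      rw [hx] at hcons
      rw [hcons]
      simp only [Option.elim_none, Option.elim_some]
      rw [ih]
      by_cases hks : s = k <;>
        simp [hks, hpx]
    · have hpx : (pvHeaderOf x).isNone = false := by rw [hx]; rfl
      have hcons2 := pvCollect_cons none x r k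
      rw [hx] at hcons hcons2
      rw [hcons]
      simp only [Option.elim_some]
      simp [hpx, hcons2]

lemma pv_getDB : ∀ (fuel : Nat) (ls : List String) (d : PySem.Dict String (List String)) (k : String),
    ls.length ≤ fuel → (pvGoB fuel ls d).getD k [] = d.getD k [] ++ pvCollect none ls k := by
  intro fuel
  induction fuel with
  | zero =>
    intro ls d k hlen
    match ls with
    | [] => rw [pvGoB_zero, pvCollect_nil, List.append_nil]
    | x :: r => simp at hlen
  | succ fuel ih =>
    intro ls d k hlen
    match ls with
    | [] => rw [pvGoB_succ_nil, pvCollect_nil, List.append_nil]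
    | x :: r =>
      rw [pvGoB_succ_cons, pvCollect_cons]
      have hr : r.length ≤ fuel := by simp only [List.length_cons] at hlen; omega
      rcases hx : pvHeaderOf x with _ | sec
      · simp only [Option.elim_none]
        exact ih r d k hr
      · simp only [Option.elim_some, Option.elim_none]
        have hr' : (r.dropWhile (fun y => (pvHeaderOf y).isNone)).length ≤ fuel := by
          have h1 := List.length_dropWhile_le (fun y => (pvHeaderOf y).isNone) r
          omega
        rw [ih _ _ k hr', PySem.Dict.getD_modify, pv_collect_some]
        by_cases hks : k = sec
        · subst hks; simp
        · simp [hks, Ne.symm hks]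

-- ===== VERDICT (by name: the statement is the Claim_ definition above) =====
set_option maxHeartbeats 1000000 in
theorem parse_sections_by_iteration_spec : Claim_equal_parse_sections_by_iteration := by
  intro text _
  unfold Spec_parse_sections_by_iteration parse_sections_by_iteration parse_sections_by_iteration_alt
  generalize (PySem.Str.split? text "\n").getD [] = lines
  have hd0 : pvSectionKeywords.keys.foldl (fun d key => d.insert key ([] : List String)) PySem.Dict.empty
      = PySem.Dict.ofList [("profile_summary", []), ("work_experience", []), ("education", []), ("skills", [])] := by
    decide
  rw [hd0]
  set d0 : PySem.Dict String (List String) :=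
    PySem.Dict.ofList [("profile_summary", []), ("work_experience", []), ("education", []), ("skills", [])] with hd0def
  have hkd0 : d0.keys = pvK4 := by rw [hd0def]; decide
  have hkA : (pvLoopA lines d0 none).keys = pvK4 := pv_keysA lines d0 none hkd0 (by simp)
  have hkB : (pvGoB lines.length lines d0).keys = pvK4 := pv_keysB lines.length lines d0 hkd0
  have hnodup : pvK4.Nodup := by decide
  rw [PySem.Dict.items_eq_map_keys _ (by rw [hkA]; exact hnodup) ([] : List String),
      PySem.Dict.items_eq_map_keys _ (by rw [hkB]; exact hnodup) ([] : List String)]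
  rw [hkA, hkB, List.map_map, List.map_map]
  apply List.map_congr_left
  intro k _
  simp only [Function.comp]
  rw [pv_getDA, pv_getDB _ _ _ _ (Nat.le_refl _)]
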